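-- pv_equiv track=rewrite | github.com/WeianMao/triattention | weian_development/hf_offline_runner/run_dispatch_hf_serialized.py | split_qids
-- ===== SOURCE A (Python) =====
-- from typing import Dict, Iterable, List, Sequence
--
-- def split_qids(qids: Sequence[int], slots: int) -> List[List[int]]:
--     if slots <= 0:
--         raise ValueError("Number of GPU slots must be positive.")
--
--     if not qids:
--         return [[] for _ in range(slots)]
--
--     base = len(qids) // slots
--     remainder = len(qids) % slots
--     batches: List[List[int]] = []
--     start = 0
--     for index in range(slots):
--         extra = 1 if index < remainder else 0
--         stop = start + base + extra
--         batches.append(list(qids[start:stop]))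
--         start = stop
--     return batches
-- ===== SOURCE B (Python) =====
-- from typing import List, Sequence
--
-- def split_qids(qids: Sequence[int], slots: int) -> List[List[int]]:
--     if slots <= 0:
--         raise ValueError("Number of GPU slots must be positive.")
--     it = iter(qids)
--     left = len(qids)
--     batches: List[List[int]] = []
--     for remaining in range(slots, 0, -1):
--         take = -(-left // remaining)  # ceil division: give this batch its fair share of what is left
--         batches.append([next(it) for _ in range(take)])
--         left -= take
--     return batches
-- ===== Notes on version B (the rewrite author's own statement) =====
-- stated objective: alternative
-- what changed: Replaces A's precomputed base/remainder and running start pointer with a greedy consume loop: counting remaining slots down, each step takes ceil(left/remaining) elements off a single iterator, so no slice boundaries or base//remainder arithmetic are ever computed.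
import Mathlib
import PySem

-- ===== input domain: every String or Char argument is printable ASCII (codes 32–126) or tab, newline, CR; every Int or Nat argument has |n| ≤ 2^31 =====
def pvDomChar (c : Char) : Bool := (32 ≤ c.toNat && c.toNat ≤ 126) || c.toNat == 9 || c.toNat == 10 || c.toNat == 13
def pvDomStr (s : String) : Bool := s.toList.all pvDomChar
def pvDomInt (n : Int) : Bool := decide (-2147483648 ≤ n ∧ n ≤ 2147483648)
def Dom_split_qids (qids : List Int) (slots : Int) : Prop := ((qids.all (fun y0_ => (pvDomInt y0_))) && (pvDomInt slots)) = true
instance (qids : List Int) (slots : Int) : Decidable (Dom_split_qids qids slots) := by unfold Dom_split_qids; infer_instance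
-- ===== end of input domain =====

-- B replaces A's precomputed base/remainder arithmetic with a greedy consume loop:
-- it takes ceil(left/remaining) elements off a single iterator each step; objective: alternative.
-- Proved equal on Pre_ (slots > 0; A raises ValueError otherwise).

-- ===== PORT A =====
-- Literal port of A: early return for empty qids, then a loop over range(slots)
-- carrying (batches, start); for slots ≤ 0 Python raises (outside Pre_).
def split_qids (qids : List Int) (slots : Int) : List (List Int) :=
  if slots ≤ 0 then []  -- Python: raise ValueError (outside Pre_)
  else if qids = [] then (PySem.List.pyRange 0 slots 1).map (fun _ => ([] : List Int))
  else
    let base := PySem.Int.floordiv (qids.length : Int) slots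
    let rem := PySem.Int.mod (qids.length : Int) slots
    ((PySem.List.pyRange 0 slots 1).foldl
      (fun (st : List (List Int) × Int) i =>
        let stop := st.2 + base + (if i < rem then 1 else 0)
        (st.1 ++ [PySem.List.slice qids (some st.2) (some stop)], stop))
      (([] : List (List Int)), (0 : Int))).1

-- ===== PORT B =====
-- B-side helper: '[next(it) for _ in range(k)]' — take k elements off the iterator,
-- returning (the batch, the rest of the iterator). The [] case with k > 0 would be
-- Python's StopIteration; B never reaches it (take never exceeds left).
def takeNext (it : List Int) : Nat → (List Int × List Int)
  | 0 => ([], it)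
  | Nat.succ k =>
    match it with
    | [] => ([], [])
    | x :: xs => let p := takeNext xs k; (x :: p.1, p.2)

-- Literal port of B: loop over range(slots, 0, -1) carrying (batches, it, left);
-- take = -(-left // remaining) is Python's ceiling division.
def split_qids_alt (qids : List Int) (slots : Int) : List (List Int) :=
  if slots ≤ 0 then []  -- Python: raise ValueError (outside Pre_)
  else
    ((PySem.List.pyRange slots 0 (-1)).foldl
      (fun (st : List (List Int) × List Int × Int) remaining =>
        let take := -(PySem.Int.floordiv (-st.2.2) remaining)
        let p := takeNext st.2.1 take.toNat
        (st.1 ++ [p.1], p.2, st.2.2 - take))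
      (([] : List (List Int)), qids, (qids.length : Int))).1

-- ===== PRECONDITION & SPEC =====
-- Pre_ excludes exactly slots ≤ 0, where Python A raises ValueError.
def Pre_split_qids (qids : List Int) (slots : Int) : Prop := 0 < slots
instance (qids : List Int) (slots : Int) : Decidable (Pre_split_qids qids slots) := by unfold Pre_split_qids; infer_instance
def pvWitness_split_qids : List Int × Int := ([1, 2, 3, 4, 5], 2)

def Spec_split_qids (qids : List Int) (slots : Int) (out : List (List Int)) : Prop := out = split_qids_alt qids slots
instance (qids : List Int) (slots : Int) (out : List (List Int)) : Decidable (Spec_split_qids qids slots out) := by unfold Spec_split_qids; infer_instance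

-- ===== CLAIM (what is proved, stated in full; the proofs are below) =====
def Claim_equal_split_qids : Prop := ∀ (qids : List Int) (slots : Int), Dom_split_qids qids slots → Pre_split_qids qids slots → Spec_split_qids qids slots (split_qids qids slots)

-- ===== LEMMAS AND PROOFS =====

-- the common closed form both loops are proved equal to
def closedForm (qids : List Int) (base rem i slots : Int) : List (List Int) :=
  (PySem.List.pyRange i slots 1).map
    (fun j => PySem.List.slice qids (some (j * base + min j rem))
                                    (some ((j + 1) * base + min (j + 1) rem)))

-- A's loop invariant: starting at boundary a*base + min a rem produces the
-- closed-form batches for indices a..slots-1, appended to the accumulator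
theorem loopA_closed (qids : List Int) (base rem : Int)
    (k : Nat) : ∀ (a : Int) (acc : List (List Int)) (slots : Int),
    a + k = slots →
    ((PySem.List.pyRange a slots 1).foldl
      (fun (st : List (List Int) × Int) i =>
        let stop := st.2 + base + (if i < rem then 1 else 0)
        (st.1 ++ [PySem.List.slice qids (some st.2) (some stop)], stop))
      (acc, a * base + min a rem)).1
    = acc ++ closedForm qids base rem a slots := by
  induction k with
  | zero =>
    intro a acc slots h
    rw [closedForm, PySem.List.pyRange_one_eq_nil (by omega)]
    simp
  | succ m ih =>
    intro a acc slots h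
    rw [closedForm, PySem.List.pyRange_one_cons (by omega)]
    simp only [List.foldl_cons, List.map_cons]
    have hstop : a * base + min a rem + base + (if a < rem then 1 else 0)
        = (a + 1) * base + min (a + 1) rem := by
      split_ifs with hc <;> [skip; skip] <;> ring_nf <;> omega
    rw [hstop]
    have := ih (a + 1)
      (acc ++ [PySem.List.slice qids (some (a * base + min a rem))
              (some ((a + 1) * base + min (a + 1) rem))]) slots (by omega)
    rw [closedForm] at this
    simpa using this

-- B's loop invariant: with i batches emitted, the iterator holds
-- qids.drop (i*base + min i rem), left is its length, and the countdown loop over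
-- the remaining slots produces the closed-form batches for indices i..slots-1
theorem takeNext_eq (k : Nat) : ∀ (it : List Int), k ≤ it.length →
    takeNext it k = (it.take k, it.drop k) := by
  induction k with
  | zero => intro it _; simp [takeNext]
  | succ m ih =>
    intro it hk
    cases it with
    | nil => simp at hk
    | cons x xs =>
      simp only [takeNext, List.take_succ_cons, List.drop_succ_cons]
      rw [ih xs (by simpa using hk)]

theorem loopB_closed (qids : List Int) (base rem : Int)
    (hb : 0 ≤ base) (hr : 0 ≤ rem)
    (k : Nat) : ∀ (i slots : Int) (acc : List (List Int)),
    i + k = slots → 0 ≤ i → rem ≤ slots →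
    (qids.length : Int) = slots * base + rem →
    ((PySem.List.pyRange (slots - i) 0 (-1)).foldl
      (fun (st : List (List Int) × List Int × Int) remaining =>
        let take := -(PySem.Int.floordiv (-st.2.2) remaining)
        let p := takeNext st.2.1 take.toNat
        (st.1 ++ [p.1], p.2, st.2.2 - take))
      (acc, qids.drop (i * base + min i rem).toNat,
       (qids.length : Int) - (i * base + min i rem))).1
    = acc ++ closedForm qids base rem i slots := by
  induction k with
  | zero =>
    intro i slots acc h hi hrs hn
    rw [closedForm, PySem.List.pyRange_neg_one_eq_nil (by omega),
        PySem.List.pyRange_one_eq_nil (by omega)]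
    simp
  | succ m ih =>
    intro i slots acc h hi hrs hn
    have hpos : (0 : Int) < slots - i := by omega
    have hib : 0 ≤ i * base := mul_nonneg hi hb
    have hsb : i * base ≤ slots * base :=
      mul_le_mul_of_nonneg_right (by omega) hb
    have ha0 : 0 ≤ i * base + min i rem := by omega
    have han : i * base + min i rem ≤ (qids.length : Int) := by omega
    rw [PySem.List.pyRange_neg_one_cons hpos]
    simp only [List.foldl_cons]
    have htake : -(PySem.Int.floordiv
          (-((qids.length : Int) - (i * base + min i rem))) (slots - i))
        = base + (if i < rem then 1 else 0) := by
      rw [PySem.Int.neg_floordiv_neg_eq_iff_of_pos hpos]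
      split_ifs with hc
      · have hmin : min i rem = i := by omega
        rw [hmin]
        constructor
        all_goals (ring_nf; ring_nf at hn; linarith)
      · have hmin : min i rem = rem := by omega
        rw [hmin]
        constructor
        all_goals (ring_nf; ring_nf at hn; linarith)
    have hbnd : (i + 1) * base + min (i + 1) rem
        = (i * base + min i rem) + (base + (if i < rem then 1 else 0)) := by
      split_ifs with hc <;> ring_nf <;> omega
    have htk0 : 0 ≤ base + (if i < rem then 1 else 0) := by
      split_ifs <;> omega
    -- the batch never outruns the iterator: a + take ≤ len
    have hfit : (i * base + min i rem) + (base + (if i < rem then 1 else 0))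
        ≤ (qids.length : Int) := by
      rw [← hbnd]
      have h1b : 0 ≤ (i + 1) * base := mul_nonneg (by omega) hb
      have h1s : (i + 1) * base ≤ slots * base :=
        mul_le_mul_of_nonneg_right (by omega) hb
      omega
    have hdlen : (qids.drop (i * base + min i rem).toNat).length
        = qids.length - (i * base + min i rem).toNat := by
      rw [List.length_drop]
    have hle : (base + (if i < rem then 1 else 0)).toNat
        ≤ (qids.drop (i * base + min i rem).toNat).length := by
      rw [hdlen]; omega
    rw [htake, takeNext_eq _ _ hle]
    have hslice1 : (qids.drop (i * base + min i rem).toNat).take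
          (base + (if i < rem then 1 else 0)).toNat
        = PySem.List.slice qids (some (i * base + min i rem))
            (some ((i + 1) * base + min (i + 1) rem)) := by
      rw [hbnd, PySem.List.slice_toNat _ ha0 (by omega)]
      congr 1
      omega
    have hslice2 : (qids.drop (i * base + min i rem).toNat).drop
          (base + (if i < rem then 1 else 0)).toNat
        = qids.drop ((i + 1) * base + min (i + 1) rem).toNat := by
      rw [List.drop_drop, hbnd]
      congr 1
      omega
    have hleft : (qids.length : Int) - (i * base + min i rem)
          - (base + (if i < rem then 1 else 0))
        = (qids.length : Int) - ((i + 1) * base + min (i + 1) rem) := by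
      rw [hbnd]; ring
    simp only [hslice1, hslice2, hleft]
    have := ih (i + 1) slots
      (acc ++ [PySem.List.slice qids (some (i * base + min i rem))
              (some ((i + 1) * base + min (i + 1) rem))])
      (by omega) (by omega) hrs hn
    rw [closedForm] at this
    have hstep : slots - i - 1 = slots - (i + 1) := by ring
    rw [hstep]
    rw [closedForm, PySem.List.pyRange_one_cons (by omega), List.map_cons]
    simpa using this

-- ===== VERDICT (by name: the statement is the Claim_ definition above) =====
theorem split_qids_spec : Claim_equal_split_qids := by
  intro qids slots _ hpre
  unfold Spec_split_qids split_qids split_qids_alt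
  have hns : ¬ slots ≤ 0 := not_le.mpr hpre
  simp only [hns, if_false]
  set n : Int := (qids.length : Int) with hn_def
  set base := PySem.Int.floordiv n slots with hbase
  set rem := PySem.Int.mod n slots with hrem
  have hb : 0 ≤ base := by
    have := (PySem.Int.le_floordiv_iff_mul_le (q := 0) (a := n) hpre).mpr
      (by simp [hn_def])
    simpa [hbase] using this
  have hr : 0 ≤ rem := PySem.Int.mod_nonneg _ hpre
  have hrs : rem ≤ slots := by
    rw [hrem, PySem.Int.mod_eq_emod_of_pos hpre]
    exact le_of_lt (Int.emod_lt_of_pos _ hpre)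
  have hn : n = slots * base + rem := by
    have := PySem.Int.floordiv_mul_add_mod n slots
    rw [← hbase, ← hrem] at this
    linarith [mul_comm base slots]
  have hBside :
      ((PySem.List.pyRange slots 0 (-1)).foldl
        (fun (st : List (List Int) × List Int × Int) remaining =>
          let take := -(PySem.Int.floordiv (-st.2.2) remaining)
          let p := takeNext st.2.1 take.toNat
          (st.1 ++ [p.1], p.2, st.2.2 - take))
        (([] : List (List Int)), qids, (qids.length : Int))).1
      = closedForm qids base rem 0 slots := by
    have hm0 : min (0 : Int) rem = 0 := by omega
    have := loopB_closed qids base rem hb hr slots.toNat 0 slots []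
      (by omega) le_rfl hrs hn
    rw [hm0] at this
    simpa using this
  rw [hBside]
  by_cases hq : qids = []
  · subst hq
    rw [if_pos rfl, closedForm]
    apply List.map_congr_left
    intro j _
    simp [PySem.List.slice]
  · simp only [hq, if_false]
    have := loopA_closed qids base rem slots.toNat 0 [] slots (by omega)
    have h0 : (0 : Int) * base + min 0 rem = 0 := by omega
    rw [h0] at this
    rw [← hn_def, ← hbase, ← hrem] at *
    simpa using this
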